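-- pv_equiv track=rewrite | github.com/CSC-101/lab5-jonaxgarc | lab5.py | largest_between
-- ===== SOURCE A (Python) =====
-- def largest_between(lst:list[int], lower:int, upper:int):
--     if lower > upper or lower < 0 or upper >= len(lst):
--         return None #makes sure that the lower bound is greater than the upper
--     max_index = lower
--     for i in range(lower + 1, upper + 1): #goes through all numbers in the range
--         if lst[i] > lst[max_index]:
--             max_index = i #compares the two indexes next to each other to see which one is larger
--     return max_index
-- ===== SOURCE B (Python) =====
-- def largest_between(lst: list[int], lower: int, upper: int):
--     if lower > upper or lower < 0 or upper >= len(lst):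
--         return None
--     sub = lst[lower:upper + 1]
--     return lower + sub.index(max(sub))
-- ===== Notes on version B (the rewrite author's own statement) =====
-- stated objective: idiomatic
-- what changed: Replaces the running best-index loop with a two-step decomposition: materialise the sublist, take max(sub) in one pass, then locate its first occurrence with sub.index in a second pass.
import Mathlib
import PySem

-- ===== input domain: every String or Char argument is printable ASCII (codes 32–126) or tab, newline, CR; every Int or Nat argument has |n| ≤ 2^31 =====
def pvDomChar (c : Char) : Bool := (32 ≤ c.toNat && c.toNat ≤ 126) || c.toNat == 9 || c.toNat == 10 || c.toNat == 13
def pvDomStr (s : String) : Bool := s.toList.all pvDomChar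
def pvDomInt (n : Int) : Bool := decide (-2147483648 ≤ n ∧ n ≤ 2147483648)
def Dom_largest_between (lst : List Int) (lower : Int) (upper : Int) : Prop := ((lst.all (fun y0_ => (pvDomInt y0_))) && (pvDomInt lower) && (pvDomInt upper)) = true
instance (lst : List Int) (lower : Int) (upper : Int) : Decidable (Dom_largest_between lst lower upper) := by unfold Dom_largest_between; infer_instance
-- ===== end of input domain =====

-- B replaces A's running best-index loop by the idiomatic decomposition
-- sub = lst[lower:upper+1]; lower + sub.index(max(sub)).  Same cost; no side effects.

-- ===== PORT A =====
-- lst[i] inside the loop is in range by the guard, so `(pyGet? …).getD 0` is exact here.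
def largest_between (lst : List Int) (lower : Int) (upper : Int) : Option Int :=
  if lower > upper ∨ lower < 0 ∨ upper ≥ (lst.length : Int) then none
  else
    some ((PySem.List.pyRange (lower + 1) (upper + 1) 1).foldl
      (fun max_index i =>
        if (PySem.List.pyGet? lst i).getD 0 > (PySem.List.pyGet? lst max_index).getD 0 then i
        else max_index) lower)

-- ===== PORT B =====
-- max(sub) raises on empty and sub.index raises when absent; both are impossible after the
-- guard, so the `none` arms below are unreachable.
def largest_between_alt (lst : List Int) (lower : Int) (upper : Int) : Option Int :=
  if lower > upper ∨ lower < 0 ∨ upper ≥ (lst.length : Int) then none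
  else
    let sub := PySem.List.slice lst (some lower) (some (upper + 1))
    match PySem.List.max? sub (fun x => x) with
    | none => none
    | some m =>
      match PySem.List.index? sub m with
      | none => none
      | some k => some (lower + (k : Int))

-- ===== PRECONDITION & SPEC =====
def Spec_largest_between (lst : List Int) (lower : Int) (upper : Int) (out : Option Int) : Prop := out = largest_between_alt lst lower upper
instance (lst : List Int) (lower : Int) (upper : Int) (out : Option Int) : Decidable (Spec_largest_between lst lower upper out) := by unfold Spec_largest_between; infer_instance

-- ===== CLAIM (what is proved, stated in full; the proofs are below) =====
def Claim_equal_largest_between : Prop := ∀ (lst : List Int) (lower : Int) (upper : Int), Dom_largest_between lst lower upper → Spec_largest_between lst lower upper (largest_between lst lower upper)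

-- ===== LEMMAS AND PROOFS =====

/-- First index of the maximum of `x :: t` (strictly-greater update = first occurrence). -/
def pvIdxMax : List Int → Nat
  | [] => 0
  | x :: t =>
    match t with
    | [] => 0
    | y :: r => if r.foldl max y > x then pvIdxMax (y :: r) + 1 else 0

theorem pvFoldlMaxComm (r : List Int) (x y : Int) :
    r.foldl max (max x y) = max x (r.foldl max y) := by
  induction r generalizing y with
  | nil => simp
  | cons z r ih => simp only [List.foldl_cons, max_assoc]; exact ih (max y z)

theorem pvIdxMax_index? (x : Int) (t : List Int) :
    PySem.List.index? (x :: t) (t.foldl max x) = some (pvIdxMax (x :: t)) := by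
  induction t generalizing x with
  | nil => simp [pvIdxMax]
  | cons y r ih =>
    have hm : (y :: r).foldl max x = max x (r.foldl max y) := by
      simp only [List.foldl_cons]; exact pvFoldlMaxComm r x y
    by_cases h : r.foldl max y > x
    · have hne : x ≠ (y :: r).foldl max x := by rw [hm]; omega
      have hv : (y :: r).foldl max x = r.foldl max y := by rw [hm]; omega
      rw [PySem.List.index?_cons_of_ne _ hne, hv, ih y]
      simp [pvIdxMax, h]
    · have hv : (y :: r).foldl max x = x := by rw [hm]; omega
      rw [hv, PySem.List.index?_cons_self]
      simp [pvIdxMax, h]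

theorem pvIdxMax_get (x : Int) (t : List Int) :
    (x :: t)[pvIdxMax (x :: t)]? = some (t.foldl max x) := by
  induction t generalizing x with
  | nil => simp [pvIdxMax]
  | cons y r ih =>
    have hm : (y :: r).foldl max x = max x (r.foldl max y) := by
      simp only [List.foldl_cons]; exact pvFoldlMaxComm r x y
    by_cases h : r.foldl max y > x
    · have h1 : (y :: r).foldl max x = r.foldl max y := by rw [hm]; omega
      simp only [pvIdxMax, if_pos h, h1]
      simpa using ih y
    · have h1 : (y :: r).foldl max x = x := by rw [hm]; omega
      simp [pvIdxMax, h, h1]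

theorem pvIdxMax_lt_length (x : Int) (t : List Int) :
    pvIdxMax (x :: t) < (x :: t).length := by
  have := pvIdxMax_get x t
  exact (List.getElem?_eq_some_iff.mp this).1

theorem pvIdxMax_snoc (x : Int) (t : List Int) (y : Int) :
    pvIdxMax ((x :: t) ++ [y]) =
      if y > t.foldl max x then (x :: t).length else pvIdxMax (x :: t) := by
  induction t generalizing x with
  | nil => by_cases h : y > x <;> simp [pvIdxMax, h]
  | cons z r ih =>
    have hm : List.foldl max x (z :: r) = max x (List.foldl max z r) := by
      simp only [List.foldl_cons]; exact pvFoldlMaxComm r x z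
    have hfold : List.foldl max z (r ++ [y]) = max (List.foldl max z r) y := by
      rw [List.foldl_append]
      rfl
    simp only [List.cons_append, List.length_cons] at ih
    simp only [List.cons_append, pvIdxMax, List.length_cons]
    rw [ih, hfold, hm]
    split_ifs <;> omega

/-- A's loop over indices a+1 .. a+n computes a + (first index of max of lst[a..a+n]). -/
theorem pvLoopMain (lst : List Int) (a n : Nat) (h : a + n < lst.length) :
    (PySem.List.pyRange ((a : Int) + 1) ((a : Int) + (n : Int) + 1) 1).foldl
      (fun max_index i =>
        if (PySem.List.pyGet? lst i).getD 0 > (PySem.List.pyGet? lst max_index).getD 0 then i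
        else max_index) (a : Int)
    = (a : Int) + (pvIdxMax ((lst.drop a).take (n + 1)) : Int) := by
  induction n with
  | zero =>
    rw [PySem.List.pyRange_one_eq_nil (by omega)]
    have h1 : (lst.drop a).take 1 = [lst[a]] := by
      have hd : lst.drop a = lst[a] :: lst.drop (a + 1) := List.drop_eq_getElem_cons (by omega)
      rw [hd]; rfl
    simp [h1, pvIdxMax]
  | succ n ih =>
    have hlt : a + n < lst.length := by omega
    have hsplit : PySem.List.pyRange ((a : Int) + 1) ((a : Int) + (n : Int) + 1 + 1) 1
        = PySem.List.pyRange ((a : Int) + 1) ((a : Int) + (n : Int) + 1) 1 ++ [(a : Int) + (n : Int) + 1] :=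
      PySem.List.pyRange_one_succ_right (by omega)
    have hrange : ((a : Int) + ((n : Nat) + 1 : Nat) + 1) = ((a : Int) + (n : Int) + 1 + 1) := by
      push_cast; ring
    rw [hrange, hsplit, List.foldl_append, ih hlt]
    simp only [List.foldl_cons, List.foldl_nil]
    set sub := (lst.drop a).take (n + 1) with hsub
    have hsublen : sub.length = n + 1 := by
      simp [hsub, List.length_take, List.length_drop]; omega
    obtain ⟨x, t, hxt⟩ : ∃ x t, sub = x :: t := by
      cases hs : sub with
      | nil => rw [hs] at hsublen; simp at hsublen
      | cons x t => exact ⟨x, t, rfl⟩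
    have hidx : pvIdxMax sub < n + 1 := by
      have := pvIdxMax_lt_length x t; rw [← hxt] at this; omega
    have hgetm : (PySem.List.pyGet? lst ((a : Int) + (pvIdxMax sub : Int))).getD 0 = t.foldl max x := by
      have hcast : ((a : Int) + (pvIdxMax sub : Int)) = ((a + pvIdxMax sub : Nat) : Int) := by
        push_cast; ring
      rw [hcast, PySem.List.pyGet?_natCast]
      have h1 : lst[a + pvIdxMax sub]? = sub[pvIdxMax sub]? := by
        rw [hsub, List.getElem?_take_of_lt hidx, List.getElem?_drop]
      rw [h1, hxt, pvIdxMax_get x t]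
      rfl
    have hgety : (PySem.List.pyGet? lst ((a : Int) + (n : Int) + 1)).getD 0 = lst[a + n + 1] := by
      have hcast : ((a : Int) + (n : Int) + 1) = ((a + n + 1 : Nat) : Int) := by push_cast; ring
      rw [hcast, PySem.List.pyGet?_natCast,
        List.getElem?_eq_getElem (show a + n + 1 < lst.length by omega)]
      rfl
    have hsnoc : (lst.drop a).take (n + 1 + 1) = sub ++ [lst[a + n + 1]] := by
      rw [List.take_add_one, ← hsub]
      congr 1
      rw [List.getElem?_drop,
        List.getElem?_eq_getElem (show a + (n + 1) < lst.length by omega)]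
      have hi : a + (n + 1) = a + n + 1 := by omega
      simp only [Option.toList_some, hi]
    rw [hgetm, hgety, hsnoc, hxt, pvIdxMax_snoc x t lst[a + n + 1]]
    have hlen2 : (x :: t).length = n + 1 := by rw [← hxt]; exact hsublen
    by_cases hgt : lst[a + n + 1] > t.foldl max x
    · rw [if_pos hgt, if_pos hgt, hlen2]
      push_cast; ring
    · rw [if_neg hgt, if_neg hgt]

-- ===== VERDICT (by name: the statement is the Claim_ definition above) =====
theorem largest_between_spec : Claim_equal_largest_between := by
  intro lst lower upper _
  unfold Spec_largest_between largest_between largest_between_alt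
  by_cases hg : lower > upper ∨ lower < 0 ∨ upper ≥ (lst.length : Int)
  · simp [hg]
  · rw [if_neg hg, if_neg hg]
    rw [not_or, not_or, not_lt, not_lt, not_le] at hg
    obtain ⟨h1, h2, h3⟩ := hg
    set a := lower.toNat with ha
    set n := (upper - lower).toNat with hn
    have hlow : lower = (a : Int) := by omega
    have hup : upper = (a : Int) + (n : Int) := by omega
    have hlen : a + n < lst.length := by omega
    have hslice : PySem.List.slice lst (some lower) (some (upper + 1))
        = (lst.drop a).take (n + 1) := by
      rw [hlow, hup,
        show ((a : Int) + (n : Int) + 1) = ((a : Int) + ((n + 1 : Nat) : Int)) by push_cast; ring]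
      exact PySem.List.slice_natCast_add lst a (n + 1)
    set sub := (lst.drop a).take (n + 1) with hsub
    have hsublen : sub.length = n + 1 := by
      simp [hsub, List.length_take, List.length_drop]; omega
    obtain ⟨x, t, hxt⟩ : ∃ x t, sub = x :: t := by
      cases hs : sub with
      | nil => rw [hs] at hsublen; simp at hsublen
      | cons x t => exact ⟨x, t, rfl⟩
    have hmatch := pvIdxMax_index? x t
    simp only [hslice, hxt, PySem.List.max?_id_cons, hmatch]
    rw [hlow, hup, pvLoopMain lst a n hlen, ← hsub, hxt]
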